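-- pv_equiv track=rewrite | github.com/WaterGenie35/python-exercises | src/project_euler/problems_51_to_100/problem_61.py | is_all_sides_representable_by_different_number
-- ===== SOURCE A (Python) =====
-- from typing import Callable, Dict, List
--
-- def is_all_sides_representable_by_different_number(tally: Dict[str, List[int]]) -> bool:
--     unique_numbers = set()
--     for numbers in tally.values():
--         if len(numbers) == 0:
--             return False
--         for n in numbers:
--             unique_numbers.add(n)
--     if len(unique_numbers) != 6:
--         return False
--
--     # TODO: find proper mapping
--     # this 1-level deep is just sufficient for this problem but incorrect in general
--     for side, numbers in tally.items():
--         if len(numbers) > 1: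
--             continue
--         for other_sides, other_numbers in tally.items():
--             if side == other_sides:
--                 continue
--             if numbers[0] in other_numbers and len(other_numbers) == 1:
--                 return False
--     return True
-- ===== SOURCE B (Python) =====
-- def is_all_sides_representable_by_different_number(tally):
--     # Single pass: accumulate the union of all numbers and the values of
--     # singleton sides ("forced" values); success iff no side is empty, the
--     # union has exactly 6 numbers and no forced value repeats.
--     union = set()
--     forced = []
--     for numbers in tally.values():
--         if not numbers:
--             return False
--         union.update(numbers)
--         if len(numbers) == 1:
--             forced.append(numbers[0])
--     return len(union) == 6 and len(set(forced)) == len(forced)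
-- ===== Notes on version B (the rewrite author's own statement) =====
-- stated objective: simpler
-- what changed: One pass collecting the union and the values of singleton sides, then a duplicate test on that list, replacing A's second traversal plus nested side-vs-side quadratic scan.
import Mathlib
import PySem

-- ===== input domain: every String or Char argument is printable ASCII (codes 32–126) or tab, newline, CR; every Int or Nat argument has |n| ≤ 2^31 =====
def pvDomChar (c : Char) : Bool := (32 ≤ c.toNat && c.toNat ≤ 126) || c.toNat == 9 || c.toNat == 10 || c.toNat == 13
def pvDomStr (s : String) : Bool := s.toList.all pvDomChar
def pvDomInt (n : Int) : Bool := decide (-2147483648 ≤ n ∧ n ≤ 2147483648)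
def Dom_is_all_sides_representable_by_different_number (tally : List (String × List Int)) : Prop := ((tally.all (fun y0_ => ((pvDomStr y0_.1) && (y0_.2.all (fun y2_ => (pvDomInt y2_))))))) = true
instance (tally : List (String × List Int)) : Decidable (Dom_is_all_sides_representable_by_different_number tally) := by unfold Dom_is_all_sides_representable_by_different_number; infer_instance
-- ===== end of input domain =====

-- B replaces A's second traversal + nested quadratic side-vs-side scan by one pass that
-- collects singleton-side values and a duplicate test on that list (objective: simpler).

-- ===== PORT A =====
-- first loop: 'for numbers in tally.values(): if empty return False; add all n to the set'
def pvA_fill : List (String × List Int) → PySem.Set Int → Option (PySem.Set Int)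
  | [], acc => some acc
  | (_, nums) :: rest, acc =>
    if nums.length = 0 then none
    else pvA_fill rest (nums.foldl (fun s n => PySem.Set.add s n) acc)

-- inner loop: 'for other_sides, other_numbers in tally.items(): …' (returns False on first hit).
-- nums.headD 0 is numbers[0]; pvA_bad is only reached after pvA_fill proved every side nonempty.
def pvA_bad (tally : List (String × List Int)) (side : String) (nums : List Int) : Bool :=
  tally.any (fun q => !(side == q.1) && q.2.contains (nums.headD 0) && q.2.length == 1)

-- second loop: 'for side, numbers in tally.items(): if len > 1 continue; …'
def pvA_scan (tally : List (String × List Int)) : List (String × List Int) → Bool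
  | [] => true
  | (side, nums) :: rest =>
    if nums.length > 1 then pvA_scan tally rest
    else if pvA_bad tally side nums then false
    else pvA_scan tally rest

def is_all_sides_representable_by_different_number (tally : List (String × List Int)) : Bool :=
  match pvA_fill tally PySem.Set.empty with
  | none => false
  | some u => if u.length ≠ 6 then false else pvA_scan tally tally

-- ===== PORT B =====
-- one pass: union of all numbers + list of singleton-side values; None = early 'return False'
def pvB_loop : List (String × List Int) → PySem.Set Int → List Int → Option (PySem.Set Int × List Int)
  | [], u, f => some (u, f)
  | (_, nums) :: rest, u, f =>
    if nums.isEmpty then none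
    else pvB_loop rest (nums.foldl (fun s n => PySem.Set.add s n) u)
           (if nums.length = 1 then f ++ [nums.headD 0] else f)

def is_all_sides_representable_by_different_number_alt (tally : List (String × List Int)) : Bool :=
  match pvB_loop tally PySem.Set.empty [] with
  | none => false
  | some (u, f) => u.length == 6 && (PySem.Set.ofList f).length == f.length

-- ===== PRECONDITION & SPEC =====
-- Pre_ excludes association lists with duplicate keys: the argument is a Python dict, whose
-- keys are unique, so such lists do not represent any actual input of A.
def Pre_is_all_sides_representable_by_different_number (tally : List (String × List Int)) : Prop :=
  (tally.map Prod.fst).Nodup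
instance (tally : List (String × List Int)) : Decidable (Pre_is_all_sides_representable_by_different_number tally) := by unfold Pre_is_all_sides_representable_by_different_number; infer_instance

def pvWitness_is_all_sides_representable_by_different_number : (List (String × List Int)) :=
  [("a", [1, 2, 3]), ("b", [4, 5, 6])]

def Spec_is_all_sides_representable_by_different_number (tally : List (String × List Int)) (out : Bool) : Prop := out = is_all_sides_representable_by_different_number_alt tally
instance (tally : List (String × List Int)) (out : Bool) : Decidable (Spec_is_all_sides_representable_by_different_number tally out) := by unfold Spec_is_all_sides_representable_by_different_number; infer_instance

-- ===== CLAIM (what is proved, stated in full; the proofs are below) =====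
def Claim_equal_is_all_sides_representable_by_different_number : Prop := ∀ (tally : List (String × List Int)), Dom_is_all_sides_representable_by_different_number tally → Pre_is_all_sides_representable_by_different_number tally → Spec_is_all_sides_representable_by_different_number tally (is_all_sides_representable_by_different_number tally)

-- ===== LEMMAS AND PROOFS =====

-- the values of the singleton sides, in order
def pvForced (tally : List (String × List Int)) : List Int :=
  (tally.filter (fun p => p.2.length == 1)).map (fun p => p.2.headD 0)

theorem pvB_loop_eq (tally : List (String × List Int)) :
    ∀ (u : PySem.Set Int) (f : List Int),
      pvB_loop tally u f = (pvA_fill tally u).map (fun s => (s, f ++ pvForced tally)) := by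
  induction tally with
  | nil => intro u f; simp [pvB_loop, pvA_fill, pvForced]
  | cons hd tl ih =>
    intro u f
    obtain ⟨side, nums⟩ := hd
    by_cases hz : nums = []
    · subst hz; simp [pvB_loop, pvA_fill]
    · have hz' : nums.length ≠ 0 := by simpa [List.length_eq_zero_iff] using hz
      by_cases h1 : nums.length = 1 <;>
        simp [pvB_loop, pvA_fill, hz, hz', h1, ih, pvForced]

theorem pvA_fill_nonempty (tally : List (String × List Int)) :
    ∀ (u s : PySem.Set Int), pvA_fill tally u = some s → ∀ p ∈ tally, p.2 ≠ [] := by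
  induction tally with
  | nil => intro u s _ p hp; simp at hp
  | cons hd tl ih =>
    intro u s h p hp
    obtain ⟨side, nums⟩ := hd
    by_cases hz : nums.length = 0
    · simp [pvA_fill, hz] at h
    · simp [pvA_fill, hz] at h
      rcases List.mem_cons.mp hp with rfl | hp'
      · simpa [← List.length_pos_iff] using Nat.pos_of_ne_zero hz
      · exact ih _ _ h p hp'

theorem pvA_scan_eq (tally : List (String × List Int)) :
    ∀ (l : List (String × List Int)),
      pvA_scan tally l = l.all (fun p => decide (p.2.length > 1) || !pvA_bad tally p.1 p.2) := by
  intro l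
  induction l with
  | nil => simp [pvA_scan]
  | cons hd tl ih =>
    obtain ⟨side, nums⟩ := hd
    by_cases hg : nums.length > 1
    · simp [pvA_scan, hg, ih]
    · by_cases hb : pvA_bad tally side nums
      · simp [pvA_scan, hg, hb]
      · simp [pvA_scan, hg, hb, ih]

theorem length_ofList_eq_iff {α : Type} [BEq α] [LawfulBEq α] (f : List α) :
    (PySem.Set.ofList f).length = f.length ↔ f.Nodup := by
  induction f using List.reverseRecOn with
  | nil => simp [PySem.Set.ofList]
  | append_singleton xs x ih =>
    rw [PySem.Set.ofList_append_singleton, PySem.Set.add_eq_ite]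
    by_cases hx : x ∈ PySem.Set.ofList xs
    · have hx' : x ∈ xs := (PySem.Set.mem_ofList xs x).mp hx
      simp only [hx, if_pos]
      constructor
      · intro h
        exfalso
        have := PySem.Set.length_ofList_le (xs := xs)
        simp [List.length_append] at h
        omega
      · intro h
        exfalso
        rcases List.nodup_append.mp h with ⟨-, -, hdis⟩
        exact hdis x hx' x (by simp) rfl
    · simp only [hx, if_false, List.length_append, List.length_singleton]
      have hx' : x ∉ xs := fun hmem => hx ((PySem.Set.mem_ofList xs x).mpr hmem)
      constructor
      · intro h
        have hlen : (PySem.Set.ofList xs).length = xs.length := by omega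
        refine (List.nodup_append).mpr ⟨ih.mp hlen, List.nodup_singleton x, ?_⟩
        intro a ha b hb
        simp at hb
        subst hb
        exact fun h => hx' (h ▸ ha)
      · intro h
        have := (List.nodup_append).mp h
        have : (PySem.Set.ofList xs).length = xs.length := ih.mpr this.1
        omega

-- the pairwise relation equivalent to 'no two distinct singleton sides share their value'
theorem forced_nodup_iff (tally : List (String × List Int)) :
    (pvForced tally).Nodup ↔
      tally.Pairwise (fun a b => a.2.length = 1 → b.2.length = 1 → a.2.headD 0 ≠ b.2.headD 0) := by
  unfold pvForced
  rw [List.Nodup, List.pairwise_map, List.pairwise_filter]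
  constructor <;>
    · intro h
      refine h.imp ?_
      intro a b hab h1 h2
      exact hab (by simpa using h1) (by simpa using h2)

theorem singleton_head_mem {nums : List Int} (h : nums.length = 1) : nums.headD 0 ∈ nums := by
  match nums, h with
  | [x], _ => simp

theorem main_equiv (tally : List (String × List Int))
    (hk : (tally.map Prod.fst).Nodup)
    (hne : ∀ p ∈ tally, p.2 ≠ []) :
    (tally.all (fun p => decide (p.2.length > 1) || !pvA_bad tally p.1 p.2)) =
      ((PySem.Set.ofList (pvForced tally)).length == (pvForced tally).length) := by
  have hnodup : tally.Nodup := hk.of_map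
  have hinj : ∀ a ∈ tally, ∀ b ∈ tally, a.1 = b.1 → a = b :=
    fun a ha b hb h => List.inj_on_of_nodup_map hk ha hb h
  rw [Bool.eq_iff_iff, beq_iff_eq, length_ofList_eq_iff, forced_nodup_iff, List.all_eq_true]
  constructor
  · intro hall
    apply hnodup.pairwise_of_forall_ne
    intro a ha b hb hab h1 h2 hv
    have := hall a ha
    simp only [Bool.or_eq_true, decide_eq_true_eq, Bool.not_eq_true'] at this
    rcases this with hgt | hbad
    · omega
    · simp only [pvA_bad, List.any_eq_false] at hbad
      have := hbad b hb
      have hkey : a.1 ≠ b.1 := fun h => hab (hinj a ha b hb h)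
      have hmem : a.2.headD 0 ∈ b.2 := hv ▸ singleton_head_mem h2
      simp [hkey, h2] at this
      exact this (by simpa using hmem)
  · intro hpw p hp
    simp only [Bool.or_eq_true, decide_eq_true_eq, Bool.not_eq_true']
    by_cases hgt : p.2.length > 1
    · exact Or.inl hgt
    · right
      have h1 : p.2.length = 1 := by
        have := hne p hp
        have : p.2.length ≠ 0 := by simpa [← List.length_pos_iff] using List.length_pos_of_ne_nil this
        omega
      simp only [pvA_bad, List.any_eq_false]
      intro q hq
      by_cases hkey : p.1 = q.1
      · simp [hkey]
      · have hpq : p ≠ q := fun h => hkey (by rw [h])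
        have hR := (hpw.forall (by
          intro a b hab h1 h2
          exact fun hv => (hab h2 h1 hv.symm))) hp hq hpq
        have hne' : p.2.headD 0 ∉ q.2 ∨ q.2.length ≠ 1 := by
          by_cases h2 : q.2.length = 1
          · left
            intro hmem
            have : p.2.headD 0 = q.2.headD 0 := by
              match q.2, h2, hmem with
              | [x], _, hm => simpa using hm
            exact hR h1 h2 this
          · exact Or.inr h2
        rcases hne' with hm | hl
        · have hm' : p.2.head?.getD 0 ∉ q.2 := by simpa using hm
          simp [hm']
        · simp [hl, hkey]

-- ===== VERDICT (by name: the statement is the Claim_ definition above) =====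
theorem is_all_sides_representable_by_different_number_spec : Claim_equal_is_all_sides_representable_by_different_number := by
  intro tally _ hpre
  unfold Spec_is_all_sides_representable_by_different_number
  unfold is_all_sides_representable_by_different_number is_all_sides_representable_by_different_number_alt
  rw [pvB_loop_eq]
  cases h : pvA_fill tally PySem.Set.empty with
  | none => simp
  | some u =>
    simp only [Option.map_some, List.nil_append]
    by_cases h6 : u.length = 6
    · simp only [h6, ne_eq, not_true_eq_false, if_false, beq_self_eq_true, Bool.true_and]
      rw [pvA_scan_eq]
      exact main_equiv tally hpre (pvA_fill_nonempty tally _ _ h)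
    · simp [h6, (by simpa using h6 : ¬ (u.length == 6) = true)]
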